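-- pv_equiv track=rewrite | github.com/cja14/CASTEP_VCA_scripts | strindices.py | strsindex
-- ===== SOURCE A (Python) =====
-- def strsindex(list,strings,nmin=0,nmax=0):
--     if nmax == 0:
--         nmax = len(list)
--     i = 0
--     for item in list:
--         if all(string in item for string in strings):
--             if i >= nmin and i <= nmax:
--                 index = i
--         i = i+1
--     return index
-- ===== SOURCE B (Python) =====
-- def strsindex(list, strings, nmin=0, nmax=0):
--     # Scan backwards and return the first qualifying index (= last forward match).
--     if nmax == 0:
--         nmax = len(list)
--     for i in range(len(list) - 1, -1, -1):
--         if nmin <= i <= nmax and all(s in list[i] for s in strings):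
--             return i
--     # No qualifying index: the original raises UnboundLocalError here (outside Pre_).
-- ===== Notes on version B (the rewrite author's own statement) =====
-- stated objective: faster
-- what changed: B scans the list backwards and returns immediately at the first qualifying index, instead of A's full forward pass that keeps overwriting the last match.
import Mathlib
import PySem

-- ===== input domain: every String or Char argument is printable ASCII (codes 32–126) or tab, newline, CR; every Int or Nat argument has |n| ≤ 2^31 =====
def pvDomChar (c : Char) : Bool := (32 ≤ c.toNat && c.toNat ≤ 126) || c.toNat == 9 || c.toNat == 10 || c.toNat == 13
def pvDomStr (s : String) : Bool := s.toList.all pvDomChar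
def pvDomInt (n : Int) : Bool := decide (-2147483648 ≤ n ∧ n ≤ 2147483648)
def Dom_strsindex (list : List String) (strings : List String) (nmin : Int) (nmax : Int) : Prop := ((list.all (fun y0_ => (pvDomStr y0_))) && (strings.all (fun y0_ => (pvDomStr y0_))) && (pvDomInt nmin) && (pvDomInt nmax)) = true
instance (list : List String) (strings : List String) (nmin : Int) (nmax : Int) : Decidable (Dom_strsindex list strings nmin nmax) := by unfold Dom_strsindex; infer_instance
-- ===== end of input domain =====

-- B scans the list backwards and returns at the first qualifying index (= A's last forward match);
-- objective: faster by early exit (same worst case). Equivalence is about the return value on Pre_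
-- (inputs where some index qualifies; otherwise Python A raises UnboundLocalError).

-- ===== PORT A =====
-- forward pass: counter i, 'index' is an Option (none = never assigned = UnboundLocalError,
-- excluded by Pre_; the port returns 0 there)
def strsindex (list : List String) (strings : List String) (nmin : Int) (nmax : Int) : Int :=
  let nmax1 : Int := if nmax = 0 then (list.length : Int) else nmax
  let st := list.foldl
    (fun (st : Int × Option Int) item =>
      (st.1 + 1,
        if strings.all (fun s => PySem.Str.isIn s item) then
          if nmin ≤ st.1 ∧ st.1 ≤ nmax1 then some st.1 else st.2
        else st.2))
    ((0 : Int), (none : Option Int))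
  st.2.getD 0

-- ===== PORT B =====
-- the loop 'for i in range(len(list)-1, -1, -1)' with early return; falling off the loop
-- (Python returns no int there) is the 0 fallback, excluded by Pre_
def strsindexAltGo (list : List String) (strings : List String) (nmin : Int) (nmax1 : Int) (i : Nat) : Int :=
  if nmin ≤ (i : Int) ∧ (i : Int) ≤ nmax1 ∧ strings.all (fun s => PySem.Str.isIn s (list.getD i "")) then
    (i : Int)
  else if i = 0 then 0
  else strsindexAltGo list strings nmin nmax1 (i - 1)
termination_by i
decreasing_by omega

def strsindex_alt (list : List String) (strings : List String) (nmin : Int) (nmax : Int) : Int :=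
  let nmax1 : Int := if nmax = 0 then (list.length : Int) else nmax
  if list.length = 0 then 0
  else strsindexAltGo list strings nmin nmax1 (list.length - 1)

-- ===== PRECONDITION & SPEC =====
-- the qualifying condition at index i (used by Pre_ and by the proofs; not by the ports)
def strsCond (list : List String) (strings : List String) (nmin : Int) (nmax1 : Int) (i : Nat) : Bool :=
  decide (nmin ≤ (i : Int)) && decide ((i : Int) ≤ nmax1) &&
    strings.all (fun s => PySem.Str.isIn s (list.getD i ""))

-- Pre_ excludes exactly the inputs with no qualifying index, on which Python A raises UnboundLocalError
def Pre_strsindex (list : List String) (strings : List String) (nmin : Int) (nmax : Int) : Prop :=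
  ∃ i < list.length, strsCond list strings nmin (if nmax = 0 then (list.length : Int) else nmax) i = true
instance (list : List String) (strings : List String) (nmin : Int) (nmax : Int) : Decidable (Pre_strsindex list strings nmin nmax) := by unfold Pre_strsindex; infer_instance

def pvWitness_strsindex : List String × List String × Int × Int := (["ab", "cd"], ["a"], 0, 0)

def Spec_strsindex (list : List String) (strings : List String) (nmin : Int) (nmax : Int) (out : Int) : Prop := out = strsindex_alt list strings nmin nmax
instance (list : List String) (strings : List String) (nmin : Int) (nmax : Int) (out : Int) : Decidable (Spec_strsindex list strings nmin nmax out) := by unfold Spec_strsindex; infer_instance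

-- ===== CLAIM (what is proved, stated in full; the proofs are below) =====
def Claim_equal_strsindex : Prop := ∀ (list : List String) (strings : List String) (nmin : Int) (nmax : Int), Dom_strsindex list strings nmin nmax → Pre_strsindex list strings nmin nmax → Spec_strsindex list strings nmin nmax (strsindex list strings nmin nmax)

-- ===== LEMMAS AND PROOFS =====

-- last qualifying index among 0..k-1, as A's fold computes it
def lastMatch (list : List String) (strings : List String) (nmin : Int) (nmax1 : Int) (k : Nat) : Option Int :=
  (List.range k).foldl (fun a j => if strsCond list strings nmin nmax1 j then some (j : Int) else a) none

lemma lastMatch_succ (list strings : List String) (nmin nmax1 : Int) (k : Nat) :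
    lastMatch list strings nmin nmax1 (k + 1) =
      if strsCond list strings nmin nmax1 k then some (k : Int) else lastMatch list strings nmin nmax1 k := by
  simp [lastMatch, List.range_succ]

-- A's fold over a suffix ys of the list, with counter starting at i0
lemma foldA_spec (list strings : List String) (nmin nmax1 : Int) :
    ∀ (ys : List String) (i0 : Nat) (acc : Option Int),
      (∀ j : Nat, j < ys.length → ys.getD j "" = list.getD (i0 + j) "") →
      (ys.foldl
        (fun (st : Int × Option Int) item =>
          (st.1 + 1,
            if strings.all (fun s => PySem.Str.isIn s item) then
              if nmin ≤ st.1 ∧ st.1 ≤ nmax1 then some st.1 else st.2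
            else st.2))
        ((i0 : Int), acc)).2 =
      (List.range ys.length).foldl
        (fun a j => if strsCond list strings nmin nmax1 (i0 + j) then some ((i0 + j : Nat) : Int) else a) acc := by
  intro ys
  induction ys with
  | nil => intro i0 acc _; simp
  | cons y ys ih =>
    intro i0 acc hget
    have h0 : y = list.getD i0 "" := by
      have := hget 0 (by simp); simpa using this
    have hstep :
        (if strings.all (fun s => PySem.Str.isIn s y) then
            if nmin ≤ (i0 : Int) ∧ (i0 : Int) ≤ nmax1 then some ((i0 : Nat) : Int) else acc
          else acc) =
        (if strsCond list strings nmin nmax1 i0 then some ((i0 : Nat) : Int) else acc) := by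
      simp only [strsCond, ← h0, Bool.and_eq_true, decide_eq_true_eq]
      by_cases hall : strings.all (fun s => PySem.Str.isIn s y) = true <;>
        by_cases h1 : nmin ≤ (i0 : Int) <;> by_cases h2 : (i0 : Int) ≤ nmax1 <;>
          simp [h1, h2]
    have hget' : ∀ j : Nat, j < ys.length → ys.getD j "" = list.getD ((i0 + 1) + j) "" := by
      intro j hj
      have := hget (j + 1) (by simpa using Nat.succ_lt_succ hj)
      simpa [Nat.add_comm, Nat.add_left_comm, Nat.add_assoc] using this
    have hcast : ((i0 : Int) + 1) = ((i0 + 1 : Nat) : Int) := by push_cast; ring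
    calc ((y :: ys).foldl _ ((i0 : Int), acc)).2
        = (ys.foldl
            (fun (st : Int × Option Int) item =>
              (st.1 + 1,
                if strings.all (fun s => PySem.Str.isIn s item) then
                  if nmin ≤ st.1 ∧ st.1 ≤ nmax1 then some st.1 else st.2
                else st.2))
            (((i0 + 1 : Nat) : Int),
              if strsCond list strings nmin nmax1 i0 then some ((i0 : Nat) : Int) else acc)).2 := by
          simp only [List.foldl_cons, hstep, hcast]
      _ = (List.range ys.length).foldl
            (fun a j => if strsCond list strings nmin nmax1 ((i0 + 1) + j) then some (((i0 + 1) + j : Nat) : Int) else a)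
            (if strsCond list strings nmin nmax1 i0 then some ((i0 : Nat) : Int) else acc) := by
          exact ih (i0 + 1) _ hget'
      _ = (List.range (ys.length + 1)).foldl
            (fun a j => if strsCond list strings nmin nmax1 (i0 + j) then some ((i0 + j : Nat) : Int) else a) acc := by
          rw [List.range_succ_eq_map]
          simp [List.foldl_map, Nat.add_comm, Nat.add_left_comm]
      _ = _ := by simp

lemma strsindex_eq_lastMatch (list strings : List String) (nmin nmax : Int) :
    strsindex list strings nmin nmax =
      (lastMatch list strings nmin (if nmax = 0 then (list.length : Int) else nmax) list.length).getD 0 := by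
  unfold strsindex lastMatch
  have h := foldA_spec list strings nmin (if nmax = 0 then (list.length : Int) else nmax)
    list 0 none (by intro j hj; simp)
  simp only [Nat.cast_zero, Nat.zero_add] at h
  dsimp only
  rw [h]

-- B's downward loop computes the same last match
lemma strsCond_iff (list strings : List String) (nmin nmax1 : Int) (i : Nat) :
    strsCond list strings nmin nmax1 i = true ↔
      (nmin ≤ (i : Int) ∧ (i : Int) ≤ nmax1 ∧
        strings.all (fun s => PySem.Str.isIn s (list.getD i "")) = true) := by
  simp only [strsCond, Bool.and_eq_true, decide_eq_true_eq]
  tauto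

lemma altGo_eq_lastMatch (list strings : List String) (nmin nmax1 : Int) :
    ∀ i : Nat, strsindexAltGo list strings nmin nmax1 i =
      (lastMatch list strings nmin nmax1 (i + 1)).getD 0 ∨
      (strsindexAltGo list strings nmin nmax1 i = 0 ∧ lastMatch list strings nmin nmax1 (i + 1) = none) := by
  intro i
  induction i with
  | zero =>
    rw [strsindexAltGo, lastMatch_succ]
    by_cases h : nmin ≤ ((0 : Nat) : Int) ∧ ((0 : Nat) : Int) ≤ nmax1 ∧
        strings.all (fun s => PySem.Str.isIn s (list.getD 0 "")) = true
    · left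
      rw [if_pos h, if_pos ((strsCond_iff list strings nmin nmax1 0).2 h)]
      simp
    · right
      have hc : ¬ (strsCond list strings nmin nmax1 0 = true) :=
        fun hh => h ((strsCond_iff list strings nmin nmax1 0).1 hh)
      rw [if_neg h, if_neg hc]
      exact ⟨by simp, by simp [lastMatch]⟩
  | succ j ih =>
    rw [strsindexAltGo, lastMatch_succ]
    by_cases h : nmin ≤ ((j + 1 : Nat) : Int) ∧ ((j + 1 : Nat) : Int) ≤ nmax1 ∧
        strings.all (fun s => PySem.Str.isIn s (list.getD (j + 1) "")) = true
    · left
      rw [if_pos h, if_pos ((strsCond_iff list strings nmin nmax1 (j + 1)).2 h)]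
      simp
    · have hc : ¬ (strsCond list strings nmin nmax1 (j + 1) = true) :=
        fun hh => h ((strsCond_iff list strings nmin nmax1 (j + 1)).1 hh)
      rw [if_neg h, if_neg hc]
      simp only [Nat.succ_ne_zero, if_false, Nat.add_sub_cancel]
      exact ih

lemma lastMatch_isSome_of_cond (list strings : List String) (nmin nmax1 : Int) (k : Nat) :
    ∀ i < k, strsCond list strings nmin nmax1 i = true →
      (lastMatch list strings nmin nmax1 k).isSome := by
  induction k with
  | zero => intro i hi; omega
  | succ k ih =>
    intro i hi hc
    rw [lastMatch_succ]
    by_cases hk : strsCond list strings nmin nmax1 k = true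
    · simp [hk]
    · have hik : i < k := by
        rcases Nat.lt_succ_iff_lt_or_eq.1 hi with h | h
        · exact h
        · exact absurd (h ▸ hc) hk
      simp [hk, ih i hik hc]

-- ===== VERDICT (by name: the statement is the Claim_ definition above) =====
theorem strsindex_spec : Claim_equal_strsindex := by
  intro list strings nmin nmax _ hpre
  unfold Spec_strsindex
  obtain ⟨i, hi, hc⟩ := hpre
  set nmax1 : Int := if nmax = 0 then (list.length : Int) else nmax with hnm
  have hn : list.length ≠ 0 := by intro h; omega
  have hsome : (lastMatch list strings nmin nmax1 list.length).isSome :=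
    lastMatch_isSome_of_cond list strings nmin nmax1 list.length i hi hc
  have hA := strsindex_eq_lastMatch list strings nmin nmax
  rw [← hnm] at hA
  have hlen : list.length - 1 + 1 = list.length := Nat.succ_pred_eq_of_ne_zero hn
  have hB : strsindex_alt list strings nmin nmax =
      (lastMatch list strings nmin nmax1 list.length).getD 0 := by
    unfold strsindex_alt
    rw [← hnm]
    rcases altGo_eq_lastMatch list strings nmin nmax1 (list.length - 1) with h | ⟨h1, h2⟩
    · simp [hn, h, hlen]
    · rw [hlen] at h2
      rw [h2] at hsome
      simp at hsome
  rw [hA, hB]
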